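-- pv_equiv track=rewrite | github.com/eriq-augustine/242-2016 | code/features.py | oneHot
-- ===== SOURCE A (Python) =====
-- def oneHot(values):
--     if (len(values) == 0):
--         return []
--
--     # A mapping of keys to their respective encodings.
--     # {key0: {value0: valueIndex0, value1: valueIndex1, ...}, ...}
--     encodings = {}
--
--     # Make a deterministic ordering for the keys.
--     keys = sorted(values[0].keys())
--     totalValues = 0
--
--     # Build the encodings.
--     for key in keys:
--         encodings[key] = {}
--
--         for value in values:
--             if value[key] not in encodings[key]:
--                 encodings[key][value[key]] = totalValues
--                 totalValues += 1
--
--     # Build up the output with all zeros.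
--     rtn = [[0 for x in range(totalValues)] for value in values]
--
--     for i in range(len(values)):
--         for key, value in values[i].items():
--             rtn[i][encodings[key][value]] = 1
--
--     return rtn
-- ===== SOURCE B (Python) =====
-- def oneHot(values):
--     if not values:
--         return []
--
--     # Deterministic key order: sorted keys of the first record.
--     keys = sorted(values[0].keys())
--
--     # For each key, its distinct values in first-appearance order across all records.
--     cats = [(key, list(dict.fromkeys(rec[key] for rec in values))) for key in keys]
--
--     # Each row is the concatenation, key by key, of a one-hot block over that key's values.
--     return [[1 if v == rec[key] else 0 for key, seen in cats for v in seen]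
--             for rec in values]
-- ===== Notes on version B (the rewrite author's own statement) =====
-- stated objective: simpler
-- what changed: Instead of preallocating a zero matrix and scattering 1s through a global value->column index built by a two-level dict, B builds per-key lists of distinct values and emits each row directly as a concatenation of per-key one-hot blocks (value comparison, no index arithmetic).
import Mathlib
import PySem

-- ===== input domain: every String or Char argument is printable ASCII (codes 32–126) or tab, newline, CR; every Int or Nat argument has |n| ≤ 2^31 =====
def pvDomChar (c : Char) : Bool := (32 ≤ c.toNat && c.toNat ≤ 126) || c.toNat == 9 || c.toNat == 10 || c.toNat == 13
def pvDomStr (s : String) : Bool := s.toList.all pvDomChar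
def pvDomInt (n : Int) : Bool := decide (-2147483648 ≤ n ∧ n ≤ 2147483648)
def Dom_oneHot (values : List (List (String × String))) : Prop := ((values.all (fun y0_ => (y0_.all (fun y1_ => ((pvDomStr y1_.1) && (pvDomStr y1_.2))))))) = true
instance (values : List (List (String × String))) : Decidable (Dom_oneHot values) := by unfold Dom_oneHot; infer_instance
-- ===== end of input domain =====

-- B replaces A's preallocated zero matrix + global scatter index by per-key distinct-value
-- lists and rows built as concatenations of one-hot blocks (objective: simpler).


-- shared dict-view helpers: record[k] (first match; "" only outside Pre_) and record.keys()
def pvGet (r : List (String × String)) (k : String) : String :=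
  ((r.find? (fun p => p.1 == k)).map Prod.snd).getD ""

def pvKeys (r : List (String × String)) : List String :=
  PySem.List.dedup (r.map Prod.fst)

-- ===== PORT A =====
def oneHot (values : List (List (String × String))) : List (List Int) :=
  if values.length = 0 then [] else
  let keys := PySem.List.sorted (pvKeys (values.headD [])) (fun k => k) false
  let encTotal := keys.foldl
    (fun (st : PySem.Dict String (PySem.Dict String Int) × Nat) key =>
      let et := values.foldl
        (fun (et : PySem.Dict String Int × Nat) value =>
          if et.1.contains (pvGet value key) then et
          else (et.1.insert (pvGet value key) (et.2 : Int), et.2 + 1))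
        (PySem.Dict.empty, st.2)
      (st.1.insert key et.1, et.2))
    (PySem.Dict.empty, 0)
  values.map (fun value =>
    ((pvKeys value).map (fun k => (k, pvGet value k))).foldl
      (fun row kv =>
        row.set (((encTotal.1.getD kv.1 PySem.Dict.empty).getD kv.2 0).toNat) 1)
      (List.replicate encTotal.2 (0 : Int)))

-- ===== PORT B =====
def oneHot_alt (values : List (List (String × String))) : List (List Int) :=
  if values.length = 0 then [] else
  let keys := PySem.List.sorted (pvKeys (values.headD [])) (fun k => k) false
  let cats := keys.map (fun key => (key, PySem.List.dedup (values.map (fun r => pvGet r key))))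
  values.map (fun rec =>
    cats.flatMap (fun c => c.2.map (fun v => if v = pvGet rec c.1 then (1 : Int) else 0)))

-- ===== PRECONDITION & SPEC =====
-- Pre_ excludes exactly the inputs on which A raises KeyError: some record whose key set
-- differs from the first record's key set (missing key → build loop; extra key → fill loop).
def Pre_oneHot (values : List (List (String × String))) : Prop :=
  ∀ r ∈ values,
    (∀ k ∈ r.map Prod.fst, k ∈ (values.headD []).map Prod.fst) ∧
    (∀ k ∈ (values.headD []).map Prod.fst, k ∈ r.map Prod.fst)
instance (values : List (List (String × String))) : Decidable (Pre_oneHot values) := by unfold Pre_oneHot; infer_instance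

def pvWitness_oneHot : (List (List (String × String))) :=
  [[("a", "x"), ("b", "u")], [("a", "y"), ("b", "u")]]

def Spec_oneHot (values : List (List (String × String))) (out : List (List Int)) : Prop := out = oneHot_alt values
instance (values : List (List (String × String))) (out : List (List Int)) : Decidable (Spec_oneHot values out) := by unfold Spec_oneHot; infer_instance

-- ===== CLAIM (what is proved, stated in full; the proofs are below) =====
def Claim_equal_oneHot : Prop := ∀ (values : List (List (String × String))), Dom_oneHot values → Pre_oneHot values → Spec_oneHot values (oneHot values)

-- ===== LEMMAS AND PROOFS =====

-- distinct values of a key, in first-appearance order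
def pvV (values : List (List (String × String))) (key : String) : List String :=
  PySem.List.dedup (values.map (fun r => pvGet r key))

-- the inner dedup-enumerate loop, as a recursion on the value list
def pvNews : List String → List String → List String
  | [], _ => []
  | v :: vs, S => if v ∈ S then pvNews vs S else v :: pvNews vs (S ++ [v])

def pvMkd : PySem.Dict String Int → Nat → List String → PySem.Dict String Int
  | d, _, [] => d
  | d, t, v :: vs => pvMkd (d.insert v (t : Int)) (t + 1) vs

def pvEnc (values : List (List (String × String))) :
    PySem.Dict String (PySem.Dict String Int) → Nat → List String →
    PySem.Dict String (PySem.Dict String Int)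
  | enc, _, [] => enc
  | enc, t, k :: ks =>
    pvEnc values (enc.insert k (pvMkd PySem.Dict.empty t (pvV values k))) (t + (pvV values k).length) ks

def pvTot (values : List (List (String × String))) : List String → Nat
  | [] => 0
  | k :: ks => (pvV values k).length + pvTot values ks

def pvOff (values : List (List (String × String))) : List String → String → Nat
  | [], _ => 0
  | k' :: ks, k => if k = k' then 0 else (pvV values k').length + pvOff values ks k

def posOf : List (Nat × Nat) → List Nat
  | [] => []
  | p :: bs => p.2 :: (posOf bs).map (p.1 + ·)


lemma pvNews_update : ∀ (vs S : List String), S ++ pvNews vs S = PySem.Set.update S vs := by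
  intro vs
  induction vs with
  | nil => intro S; simp [pvNews, PySem.Set.update_nil]
  | cons v vs ih =>
    intro S
    rw [PySem.Set.update_cons]
    by_cases hv : v ∈ S
    · rw [pvNews, if_pos hv, PySem.Set.add_of_mem hv, ih]
    · rw [pvNews, if_neg hv, PySem.Set.add_of_not_mem hv]
      have := ih (S ++ [v])
      simp only [List.append_assoc, List.singleton_append] at this ⊢
      exact this

lemma pvNews_nil_right (vs : List String) : pvNews vs [] = PySem.List.dedup vs := by
  have := pvNews_update vs []
  simpa [PySem.Set.update_nil_left, PySem.List.dedup_eq_ofList] using this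

lemma inner_fold (key : String) :
    ∀ (l : List (List (String × String))) (d : PySem.Dict String Int) (t : Nat),
    l.foldl (fun et value => if et.1.contains (pvGet value key) then et
        else (et.1.insert (pvGet value key) (et.2 : Int), et.2 + 1)) (d, t)
    = (pvMkd d t (pvNews (l.map (fun r => pvGet r key)) d.keys),
       t + (pvNews (l.map (fun r => pvGet r key)) d.keys).length) := by
  intro l
  induction l with
  | nil => intro d t; simp [pvNews, pvMkd]
  | cons x xs ih =>
    intro d t
    rw [List.foldl_cons, List.map_cons, pvNews]
    by_cases hc : d.contains (pvGet x key) = true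
    · have hm : pvGet x key ∈ d.keys := (PySem.Dict.contains_iff_mem_keys d _).mp hc
      simp only [hc, if_pos, hm]
      exact ih d t
    · have hc' : d.contains (pvGet x key) = false := by simpa using hc
      have hm : pvGet x key ∉ d.keys := by
        intro h; exact hc ((PySem.Dict.contains_iff_mem_keys d _).mpr h)
      simp only [hc', Bool.false_eq_true, if_false, hm]
      rw [ih (d.insert (pvGet x key) (t : Int)) (t + 1),
        PySem.Dict.keys_insert_of_not_contains d _ hc']
      rw [pvMkd]
      rw [Prod.mk.injEq]
      refine ⟨rfl, ?_⟩
      rw [List.length_cons]; omega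

lemma pvMkd_getD_notmem : ∀ (vs : List String) (d : PySem.Dict String Int) (t : Nat) (v : String),
    v ∉ vs → (pvMkd d t vs).getD v 0 = d.getD v 0 := by
  intro vs
  induction vs with
  | nil => intro d t v _; rfl
  | cons w ws ih =>
    intro d t v hv
    rw [pvMkd, ih _ _ v (by simp_all),
      PySem.Dict.getD_insert_of_ne d _ _ (show v ≠ w by simp_all)]

lemma pvMkd_getD : ∀ (vs : List String) (d : PySem.Dict String Int) (t : Nat) (v : String),
    vs.Nodup → v ∈ vs → d.contains v = false →
    (pvMkd d t vs).getD v 0 = ((t + vs.idxOf v : Nat) : Int) := by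
  intro vs
  induction vs with
  | nil => intro d t v _ hv _; simp at hv
  | cons w ws ih =>
    intro d t v hnd hv hc
    by_cases hvw : v = w
    · subst hvw
      rw [pvMkd, pvMkd_getD_notmem _ _ _ _ (by simp_all),
        PySem.Dict.getD_insert_self, List.idxOf_cons_self]
      simp
    · rw [pvMkd, ih _ _ v hnd.of_cons (by simp_all)
        (by rw [PySem.Dict.contains_insert]; simp [hvw, hc])]
      rw [List.idxOf_cons_ne _ (by simp; exact fun h => hvw h.symm)]
      push_cast; ring

lemma outer_fold (values : List (List (String × String))) :
    ∀ (ks : List String) (enc : PySem.Dict String (PySem.Dict String Int)) (t : Nat),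
    ks.foldl (fun st key =>
      let et := values.foldl
        (fun (et : PySem.Dict String Int × Nat) value =>
          if et.1.contains (pvGet value key) then et
          else (et.1.insert (pvGet value key) (et.2 : Int), et.2 + 1))
        (PySem.Dict.empty, st.2)
      (st.1.insert key et.1, et.2)) (enc, t)
    = (pvEnc values enc t ks, t + pvTot values ks) := by
  intro ks
  induction ks with
  | nil => intro enc t; simp [pvEnc, pvTot]
  | cons k ks ih =>
    intro enc t
    rw [List.foldl_cons]
    simp only [inner_fold k values PySem.Dict.empty t]
    rw [ih, pvEnc, pvTot]
    have hk : (PySem.Dict.empty : PySem.Dict String Int).keys = [] := by rfl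
    rw [Prod.mk.injEq]
    constructor
    · rw [hk, pvNews_nil_right]; rfl
    · rw [hk, pvNews_nil_right]
      show t + (pvV values k).length + pvTot values ks = t + ((pvV values k).length + pvTot values ks)
      omega

lemma pvEnc_getD_notmem (values : List (List (String × String))) :
    ∀ (ks : List String) (enc : PySem.Dict String (PySem.Dict String Int)) (t : Nat) (k : String),
    k ∉ ks → (pvEnc values enc t ks).getD k PySem.Dict.empty = enc.getD k PySem.Dict.empty := by
  intro ks
  induction ks with
  | nil => intro enc t k _; rfl
  | cons k' ks ih =>
    intro enc t k hk
    rw [pvEnc, ih _ _ k (by simp_all),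
      PySem.Dict.getD_insert_of_ne enc _ _ (show k ≠ k' by simp_all)]

lemma pvEnc_getD (values : List (List (String × String))) :
    ∀ (ks : List String) (enc : PySem.Dict String (PySem.Dict String Int)) (t : Nat) (k : String),
    ks.Nodup → k ∈ ks →
    (pvEnc values enc t ks).getD k PySem.Dict.empty
      = pvMkd PySem.Dict.empty (t + pvOff values ks k) (pvV values k) := by
  intro ks
  induction ks with
  | nil => intro enc t k _ hk; simp at hk
  | cons k' ks ih =>
    intro enc t k hnd hk
    by_cases hkk : k = k'
    · subst hkk
      rw [pvEnc, pvEnc_getD_notmem _ _ _ _ _ (by simp_all), PySem.Dict.getD_insert_self,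
        pvOff, if_pos rfl]
      norm_num
    · rw [pvEnc, ih _ _ k hnd.of_cons (by simp_all), pvOff, if_neg hkk]
      congr 1
      omega

lemma set_fold_length : ∀ (ps : List Nat) (row : List Int),
    (ps.foldl (fun r p => r.set p 1) row).length = row.length := by
  intro ps
  induction ps with
  | nil => intro row; rfl
  | cons p ps ih => intro row; simp [List.foldl_cons, ih, List.length_set]

lemma set_fold_getElem? : ∀ (ps : List Nat) (row : List Int) (j : Nat) (h : j < row.length),
    (ps.foldl (fun r p => r.set p 1) row)[j]? = some (if j ∈ ps then 1 else row[j]) := by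
  intro ps
  induction ps with
  | nil => intro row j h; simp [List.getElem?_eq_getElem h]
  | cons p ps ih =>
    intro row j h
    have h2 : j < (row.set p 1).length := by simpa using h
    rw [List.foldl_cons, ih (row.set p 1) j h2]
    by_cases hj : j = p
    · subst hj
      rw [List.getElem_set_self (by simpa using h)]
      simp
    · rw [List.getElem_set_ne (by omega)]
      simp [List.mem_cons, hj]

lemma set_fold_replicate (ps : List Nat) (t : Nat) :
    ps.foldl (fun r p => r.set p 1) (List.replicate t (0 : Int))
      = (List.range t).map (fun j => if j ∈ ps then 1 else 0) := by
  apply List.ext_getElem?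
  intro j
  by_cases hj : j < t
  · rw [set_fold_getElem? ps _ j (by simpa using hj)]
    simp [List.getElem?_map, List.getElem?_range hj, List.getElem_replicate]
  · have h1 : (ps.foldl (fun r p => r.set p 1) (List.replicate t (0 : Int))).length ≤ j := by
      rw [set_fold_length]; simpa using Nat.le_of_not_lt hj
    rw [List.getElem?_eq_none h1, List.getElem?_eq_none (by simpa using Nat.le_of_not_lt hj)]

lemma map_indicator_eq (vs : List String) (g : String) (hnd : vs.Nodup) (hg : g ∈ vs) :
    vs.map (fun v => if v = g then (1 : Int) else 0)
      = (List.range vs.length).map (fun j => if j = vs.idxOf g then 1 else 0) := by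
  apply List.ext_getElem
  · simp
  · intro i h1 h2
    simp only [List.getElem_map, List.getElem_range]
    have hlt : vs.idxOf g < vs.length := List.idxOf_lt_length_of_mem hg
    have : vs[i]'(by simpa using h1) = g ↔ i = vs.idxOf g := by
      constructor
      · intro he
        have : vs[i]'(by simpa using h1) = vs[vs.idxOf g] := by
          rw [he, List.getElem_idxOf hlt]
        exact (List.Nodup.getElem_inj_iff hnd).mp this
      · intro he
        subst he; exact List.getElem_idxOf hlt
    simp only [this]

lemma blocks_eq : ∀ (bs : List (Nat × Nat)), (∀ p ∈ bs, p.2 < p.1) →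
    bs.flatMap (fun p => (List.range p.1).map (fun j => if j = p.2 then (1 : Int) else 0))
      = (List.range ((bs.map Prod.fst).sum)).map (fun j => if j ∈ posOf bs then (1 : Int) else 0) := by
  intro bs
  induction bs with
  | nil => intro _; rfl
  | cons p bs ih =>
    intro h
    obtain ⟨n, i⟩ := p
    have hin : i < n := h (n, i) (List.mem_cons_self)
    rw [List.flatMap_cons, ih (fun q hq => h q (List.mem_cons_of_mem _ hq))]
    rw [List.map_cons, List.sum_cons, posOf, List.range_add, List.map_append, List.map_map]
    congr 1
    · refine List.map_congr_left ?_
      intro j hj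
      have hjn : j < n := List.mem_range.mp hj
      by_cases hji : j = i
      · subst hji; simp
      · have : j ∉ (posOf bs).map (n + ·) := by
          intro hm
          obtain ⟨x, _, hx⟩ := List.mem_map.mp hm
          omega
        simp [hji, this]
    · refine List.map_congr_left ?_
      intro x _
      simp only [Function.comp]
      have h1 : ¬ (n + x = i) := by omega
      have h2 : n + x ∈ (posOf bs).map (n + ·) ↔ x ∈ posOf bs := by
        constructor
        · intro hm
          obtain ⟨y, hy, hxy⟩ := List.mem_map.mp hm
          have : y = x := by omega
          exact this ▸ hy
        · intro hm; exact List.mem_map.mpr ⟨x, hm, rfl⟩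
      simp only [List.mem_cons, h1, h2, false_or]

lemma posOf_keys (values : List (List (String × String))) (idx : String → Nat) :
    ∀ (ks : List String), ks.Nodup →
    posOf (ks.map (fun k => ((pvV values k).length, idx k)))
      = ks.map (fun k => pvOff values ks k + idx k) := by
  intro ks
  induction ks with
  | nil => intro _; rfl
  | cons k' ks ih =>
    intro hnd
    rw [List.map_cons, posOf, ih hnd.of_cons, List.map_map, List.map_cons]
    congr 1
    · simp [pvOff]
    · refine List.map_congr_left ?_
      intro k hk
      have hne : k ≠ k' := fun h => (List.nodup_cons.mp hnd).1 (h ▸ hk)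
      simp only [Function.comp]
      rw [pvOff, if_neg hne]
      omega

lemma pvTot_eq_sum (values : List (List (String × String))) :
    ∀ ks : List String, pvTot values ks = ((ks.map (fun k => (pvV values k).length)).sum) := by
  intro ks
  induction ks with
  | nil => rfl
  | cons k ks ih => rw [pvTot, List.map_cons, List.sum_cons, ih]

-- ===== VERDICT (by name: the statement is the Claim_ definition above) =====
lemma row_eq (values : List (List (String × String)))
    (hpre : Pre_oneHot values) (rec : List (String × String)) (hrec : rec ∈ values) :
    ((pvKeys rec).map (fun k => (k, pvGet rec k))).foldl
      (fun row kv =>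
        row.set ((((pvEnc values PySem.Dict.empty 0
          (PySem.List.sorted (pvKeys (values.headD [])) (fun k => k) false)).getD kv.1
            PySem.Dict.empty).getD kv.2 0).toNat) 1)
      (List.replicate (0 + pvTot values (PySem.List.sorted (pvKeys (values.headD [])) (fun k => k) false)) (0 : Int))
    = ((PySem.List.sorted (pvKeys (values.headD [])) (fun k => k) false).map
        (fun key => (key, PySem.List.dedup (values.map (fun r => pvGet r key))))).flatMap
        (fun c => c.2.map (fun v => if v = pvGet rec c.1 then (1 : Int) else 0)) := by
  set keys := PySem.List.sorted (pvKeys (values.headD [])) (fun k => k) false with hkeysdef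
  have hknd : keys.Nodup := by
    rw [hkeysdef]
    exact ((PySem.List.sorted_perm _ _ _).nodup_iff).mpr (PySem.List.nodup_dedup _)
  have hkmem : ∀ k, k ∈ keys ↔ k ∈ (values.headD []).map Prod.fst := by
    intro k
    rw [hkeysdef, PySem.List.mem_sorted, pvKeys, PySem.List.mem_dedup]
  have hkrec : ∀ k, k ∈ pvKeys rec ↔ k ∈ keys := by
    intro k
    rw [pvKeys, PySem.List.mem_dedup, hkmem k]
    exact ⟨fun h => (hpre rec hrec).1 k h, fun h => (hpre rec hrec).2 k h⟩
  -- abbreviations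
  set fB : String → Nat :=
    fun k => pvOff values keys k + (pvV values k).idxOf (pvGet rec k) with hfB
  set fA : String → Nat :=
    fun k => (((pvEnc values PySem.Dict.empty 0 keys).getD k PySem.Dict.empty).getD (pvGet rec k) 0).toNat with hfA
  have hVmem : ∀ k, pvGet rec k ∈ pvV values k := by
    intro k
    rw [pvV, PySem.List.mem_dedup]
    exact List.mem_map_of_mem hrec
  have hVnd : ∀ k, (pvV values k).Nodup := fun k => PySem.List.nodup_dedup _
  have hcomp : ∀ k ∈ keys, fA k = fB k := by
    intro k hk
    rw [hfA]
    simp only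
    rw [pvEnc_getD values keys PySem.Dict.empty 0 k hknd hk,
      pvMkd_getD (pvV values k) PySem.Dict.empty (0 + pvOff values keys k) (pvGet rec k)
        (hVnd k) (hVmem k) (PySem.Dict.contains_empty _),
      Int.toNat_natCast]
    simp only [hfB]
    omega
  -- A side: fold of sets over the record's keys
  rw [List.foldl_map]
  rw [show (fun (row : List Int) (k : String) =>
        row.set ((((pvEnc values PySem.Dict.empty 0 keys).getD k PySem.Dict.empty).getD (pvGet rec k) 0).toNat) 1)
      = (fun (row : List Int) (k : String) => row.set (fA k) 1) from rfl]
  rw [← List.foldl_map (f := fA) (g := fun (row : List Int) (p : Nat) => row.set p 1)]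
  rw [set_fold_replicate]
  -- B side: blocks
  have hblock : ∀ k ∈ keys,
      (pvV values k).map (fun v => if v = pvGet rec k then (1 : Int) else 0)
        = (List.range (pvV values k).length).map
            (fun j => if j = (pvV values k).idxOf (pvGet rec k) then (1 : Int) else 0) := by
    intro k _
    exact map_indicator_eq (pvV values k) (pvGet rec k) (hVnd k) (hVmem k)
  set g : String → Nat × Nat :=
    fun k => ((pvV values k).length, (pvV values k).idxOf (pvGet rec k)) with hg
  have hB : (keys.map (fun key => (key, PySem.List.dedup (values.map (fun r => pvGet r key))))).flatMap
        (fun c => c.2.map (fun v => if v = pvGet rec c.1 then (1 : Int) else 0))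
      = (keys.map g).flatMap
          (fun p => (List.range p.1).map (fun j => if j = p.2 then (1 : Int) else 0)) := by
    rw [List.flatMap_map, List.flatMap_map]
    apply List.flatMap_congr ?_
    intro k hk
    exact hblock k hk
  rw [hB, blocks_eq (keys.map g) (by
    intro p hp
    obtain ⟨k, _, rfl⟩ := List.mem_map.mp hp
    exact List.idxOf_lt_length_of_mem (hVmem k))]
  have hsum : ((keys.map g).map Prod.fst).sum = pvTot values keys := by
    rw [List.map_map, pvTot_eq_sum values keys]
    rfl
  have hpos : posOf (keys.map g) = keys.map fB :=
    posOf_keys values (fun k => (pvV values k).idxOf (pvGet rec k)) keys hknd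
  rw [hsum, hpos]
  have hT : 0 + pvTot values keys = pvTot values keys := by omega
  rw [hT]
  apply List.map_congr_left
  intro j _
  have hmemiff : (j ∈ (pvKeys rec).map fA) ↔ (j ∈ keys.map fB) := by
    constructor
    · intro hm
      obtain ⟨k, hk, he⟩ := List.mem_map.mp hm
      have hk' : k ∈ keys := (hkrec k).mp hk
      exact List.mem_map.mpr ⟨k, hk', by rw [← hcomp k hk']; exact he⟩
    · intro hm
      obtain ⟨k, hk, he⟩ := List.mem_map.mp hm
      exact List.mem_map.mpr ⟨k, (hkrec k).mpr hk, by rw [hcomp k hk]; exact he⟩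
  simp only [hmemiff]

theorem oneHot_spec : Claim_equal_oneHot := by
  intro values _ hpre
  unfold Spec_oneHot oneHot oneHot_alt
  by_cases hlen : values.length = 0
  · rw [if_pos hlen, if_pos hlen]
  · rw [if_neg hlen, if_neg hlen]
    simp only
    rw [outer_fold values]
    apply List.map_congr_left
    intro rec hrec
    exact row_eq values hpre rec hrec
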